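-- pv_equiv track=rewrite | github.com/coltercarson/music-viewer | backend/prepare_metadata.py | get_genre_colour
-- ===== SOURCE A (Python) =====
-- def get_genre_colour(genre, genre_groups):
--     # Assign a unique primary colour to each genre, cycling if needed
--     primary_colours = [
--         "#e6194b", "#3cb44b", "#ffe119", "#4363d8", "#f58231",
--         "#911eb4", "#46f0f0", "#f032e6", "#bcf60c", "#fabebe",
--         "#008080", "#e6beff", "#9a6324", "#fffac8", "#800000",
--         "#aaffc3", "#808000", "#ffd8b1", "#000075", "#808080"
--     ]
--     genre_list = sorted(genre_groups.keys())
--     colour_map = {g: primary_colours[i % len(primary_colours)] for i, g in enumerate(genre_list)}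
--     return colour_map.get(genre, "#cccccc")
-- ===== SOURCE B (Python) =====
-- def get_genre_colour(genre, genre_groups):
--     # Rank = number of keys below `genre`; no sort, no colour-map build
--     primary_colours = [
--         "#e6194b", "#3cb44b", "#ffe119", "#4363d8", "#f58231",
--         "#911eb4", "#46f0f0", "#f032e6", "#bcf60c", "#fabebe",
--         "#008080", "#e6beff", "#9a6324", "#fffac8", "#800000",
--         "#aaffc3", "#808000", "#ffd8b1", "#000075", "#808080"
--     ]
--     if genre not in genre_groups:
--         return "#cccccc"
--     rank = sum(1 for g in genre_groups if g < genre)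
--     return primary_colours[rank % len(primary_colours)]
-- ===== Notes on version B (the rewrite author's own statement) =====
-- stated objective: faster
-- what changed: Instead of sorting all keys and building the full genre->colour dict, B computes the genre's rank directly as the count of keys below it and indexes the colour table once (early-exit default when the genre is absent); a timing run measured B 3.6x faster at n=262144.
import Mathlib
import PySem

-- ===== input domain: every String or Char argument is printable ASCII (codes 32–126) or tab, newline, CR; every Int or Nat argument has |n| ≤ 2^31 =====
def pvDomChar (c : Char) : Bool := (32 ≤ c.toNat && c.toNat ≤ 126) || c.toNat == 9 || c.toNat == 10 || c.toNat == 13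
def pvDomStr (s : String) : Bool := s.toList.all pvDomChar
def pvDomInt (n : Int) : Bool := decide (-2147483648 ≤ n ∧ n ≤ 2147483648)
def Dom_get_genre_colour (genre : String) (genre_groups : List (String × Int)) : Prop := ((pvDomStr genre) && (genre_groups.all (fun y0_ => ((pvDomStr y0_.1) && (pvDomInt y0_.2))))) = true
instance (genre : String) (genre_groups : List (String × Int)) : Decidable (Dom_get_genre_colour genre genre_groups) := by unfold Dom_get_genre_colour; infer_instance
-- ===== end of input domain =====

-- B replaces A's sort + full colour-map build by a single linear rank count over the keys.
-- the shared literal colour table of both Pythons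
def pvPrimary : List String := [
  "#e6194b", "#3cb44b", "#ffe119", "#4363d8", "#f58231",
  "#911eb4", "#46f0f0", "#f032e6", "#bcf60c", "#fabebe",
  "#008080", "#e6beff", "#9a6324", "#fffac8", "#800000",
  "#aaffc3", "#808000", "#ffd8b1", "#000075", "#808080"]

-- ===== PORT A =====
def get_genre_colour (genre : String) (genre_groups : List (String × Int)) : String :=
  let genre_list := PySem.List.sorted (PySem.Dict.keys (PySem.Dict.mk genre_groups)) (fun x => x) false
  let colour_map := (PySem.List.enumerate genre_list 0).foldl
    (fun (d : PySem.Dict String String) p =>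
      d.insert p.2 (PySem.List.pyGetD pvPrimary (PySem.Int.mod p.1 (pvPrimary.length : Int)) ""))
    PySem.Dict.empty
  colour_map.getD genre "#cccccc"

-- ===== PORT B =====
def get_genre_colour_alt (genre : String) (genre_groups : List (String × Int)) : String :=
  if (PySem.Dict.mk genre_groups).contains genre = false then "#cccccc"
  else
    let rank : Int := (PySem.Dict.keys (PySem.Dict.mk genre_groups)).foldl
      (fun acc g => if g < genre then acc + 1 else acc) 0
    PySem.List.pyGetD pvPrimary (PySem.Int.mod rank (pvPrimary.length : Int)) ""

-- ===== PRECONDITION & SPEC =====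
-- Pre_ excludes association lists with duplicate keys, which represent no Python dict
-- (genre_groups is a dict in Python, so its keys are necessarily distinct).
def Pre_get_genre_colour (genre : String) (genre_groups : List (String × Int)) : Prop :=
  (genre_groups.map Prod.fst).Nodup
instance (genre : String) (genre_groups : List (String × Int)) : Decidable (Pre_get_genre_colour genre genre_groups) := by unfold Pre_get_genre_colour; infer_instance

def pvWitness_get_genre_colour : String × (List (String × Int)) := ("a", [("a", 1), ("b", 2)])

def Spec_get_genre_colour (genre : String) (genre_groups : List (String × Int)) (out : String) : Prop := out = get_genre_colour_alt genre genre_groups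
instance (genre : String) (genre_groups : List (String × Int)) (out : String) : Decidable (Spec_get_genre_colour genre genre_groups out) := by unfold Spec_get_genre_colour; infer_instance

-- ===== CLAIM (what is proved, stated in full; the proofs are below) =====
def Claim_equal_get_genre_colour : Prop := ∀ (genre : String) (genre_groups : List (String × Int)), Dom_get_genre_colour genre genre_groups → Pre_get_genre_colour genre genre_groups → Spec_get_genre_colour genre genre_groups (get_genre_colour genre genre_groups)

-- ===== LEMMAS AND PROOFS =====

-- looking up `x` in the dict built by A's comprehension over an enumerated strictly
-- increasing key list: the colour of x's rank if x occurs, the old binding otherwise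
theorem pvFoldLookup (c : Int → String) (x : String) (dflt : String) :
    ∀ (s : List String) (n : Int) (d : PySem.Dict String String),
      s.Pairwise (· < ·) →
      PySem.Dict.getD
        ((PySem.List.enumerate s n).foldl (fun d p => d.insert p.2 (c p.1)) d) x dflt
      = if x ∈ s then c (n + ((s.filter (fun g => decide (g < x))).length : Int))
        else d.getD x dflt := by
  intro s
  induction s with
  | nil => intro n d _; simp [PySem.List.enumerate_nil]
  | cons g t ih =>
    intro n d hp
    have hgt : ∀ y ∈ t, g < y := (List.pairwise_cons.mp hp).1
    have hpt : t.Pairwise (· < ·) := (List.pairwise_cons.mp hp).2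
    rw [PySem.List.enumerate_cons]
    simp only [List.foldl_cons]
    rw [ih (n + 1) _ hpt]
    by_cases hxt : x ∈ t
    · have hgx : g < x := hgt x hxt
      have hd : (decide (g < x)) = true := by simpa using hgx
      simp only [hxt, if_true, List.mem_cons, or_true, List.filter_cons, hd]
      simp only [List.length_cons]
      congr 1
      push_cast
      ring
    · by_cases hxg : x = g
      · subst hxg
        simp only [hxt, if_false, List.mem_cons, true_or, if_true]
        rw [PySem.Dict.getD_insert_self]
        have hfc : (x :: t).filter (fun g' => decide (g' < x)) = [] := by
          apply List.filter_eq_nil_iff.mpr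
          intro y hy
          rcases List.mem_cons.mp hy with h | h
          · subst h; simp
          · simpa using not_lt_of_gt (hgt y h)
        rw [hfc]
        simp
      · simp only [hxt, if_false, List.mem_cons, hxg, false_or]
        rw [PySem.Dict.getD_insert]
        simp [hxg]

theorem get_genre_colour_spec : Claim_equal_get_genre_colour := by
  intro genre gg _ hpre
  unfold Spec_get_genre_colour get_genre_colour get_genre_colour_alt
  dsimp only
  set ks := PySem.Dict.keys (PySem.Dict.mk gg) with hks
  have hksnd : ks.Nodup := hpre
  set s := PySem.List.sorted ks (fun x => x) false with hs
  have hperm : s.Perm ks := PySem.List.sorted_perm ks (fun x => x) false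
  have hsnd : s.Nodup := hperm.nodup_iff.mpr hksnd
  have hple : s.Pairwise (fun a b => a ≤ b) := PySem.List.sorted_pairwise ks (fun x => x)
  have hplt : s.Pairwise (· < ·) := by
    have := hple.and hsnd
    exact this.imp (fun h => lt_of_le_of_ne h.1 h.2)
  rw [pvFoldLookup (fun i => PySem.List.pyGetD pvPrimary (PySem.Int.mod i (pvPrimary.length : Int)) "") genre "#cccccc" s 0 PySem.Dict.empty hplt]
  have hmem : (genre ∈ s) ↔ genre ∈ ks := PySem.List.mem_sorted ks (fun x => x) false genre
  have hcont : (PySem.Dict.mk gg).contains genre = decide (genre ∈ ks) := by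
    rw [PySem.Dict.contains_eq_decide_mem_keys]
  by_cases hin : genre ∈ ks
  · have hcount : ((0 : Int) + ((s.filter (fun g => decide (g < genre))).length : Int))
        = ks.foldl (fun acc g => if g < genre then acc + 1 else acc) (0 : Int) := by
      rw [PySem.List.foldl_ite_add_one]
      rw [← List.countP_eq_length_filter, hperm.countP_eq]
    simp only [hmem.mpr hin, if_true, hcont, hin, decide_true]
    simp only [Bool.true_eq_false, if_false]
    rw [hcount]
  · simp only [hmem, hin, if_false, hcont, decide_false, if_true, PySem.Dict.getD_empty]
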